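-- pv_equiv track=rewrite | github.com/jjaniec/1ads-mp2 | src/possible.py | get_adjacent_cell
-- ===== SOURCE A (Python) =====
-- from typing import List, Any
--
-- Row = List[int]
--
-- Board = List[Row]
--
-- def get_adjacent_cell(board: Board, x: int, y: int) -> Row:
--     """Return a list containing the adjacents cells to the x;y one."""
--
--     return [
--         cell
--         for row_index, row in enumerate(board)
--         for col_index, cell in enumerate(row)
--         if (abs(row_index - y) <= 1 and
--             abs(col_index - x) <= 1 and
--             [row_index, col_index] != [y, x]) # We don't want the cell itself.
--     ]
-- ===== SOURCE B (Python) =====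
-- def get_adjacent_cell(board, x, y):
--     """Return a list containing the adjacents cells to the x;y one."""
--     res = []
--     for r in range(max(y - 1, 0), min(y + 2, len(board))):
--         row = board[r]
--         for c in range(max(x - 1, 0), min(x + 2, len(row))):
--             if r != y or c != x:
--                 res.append(row[c])
--     return res
-- ===== Notes on version B (the rewrite author's own statement) =====
-- stated objective: faster
-- what changed: B iterates only the clamped 3x3 neighborhood index ranges [max(y-1,0),min(y+2,rows)) x [max(x-1,0),min(x+2,len(row))) with direct indexing instead of scanning every cell of the board and filtering by |row-y|<=1, |col-x|<=1.
import Mathlib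
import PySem

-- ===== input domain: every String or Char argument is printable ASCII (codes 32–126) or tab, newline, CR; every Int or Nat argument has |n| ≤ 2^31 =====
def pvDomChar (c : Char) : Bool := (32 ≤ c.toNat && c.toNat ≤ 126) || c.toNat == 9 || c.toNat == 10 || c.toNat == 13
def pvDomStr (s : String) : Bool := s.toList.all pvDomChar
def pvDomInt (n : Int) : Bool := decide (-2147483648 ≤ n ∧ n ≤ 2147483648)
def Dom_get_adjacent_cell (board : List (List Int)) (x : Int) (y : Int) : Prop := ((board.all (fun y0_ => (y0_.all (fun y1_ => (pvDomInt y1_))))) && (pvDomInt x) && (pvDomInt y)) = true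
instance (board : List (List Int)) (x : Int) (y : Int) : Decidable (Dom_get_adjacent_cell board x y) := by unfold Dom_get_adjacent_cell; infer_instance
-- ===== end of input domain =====

-- B replaces A's full-board scan-and-filter by iterating only the clamped 3x3 neighborhood
-- index ranges with direct indexing (objective: faster — asymptotic, O(rows*cols) → at most 9 cell accesses).

-- ===== PORT A =====
-- A: nested comprehension over enumerate(board) / enumerate(row), filtering by distance to (y,x).
def get_adjacent_cell (board : List (List Int)) (x : Int) (y : Int) : List Int :=
  (PySem.List.enumerate board 0).flatMap (fun rp =>
    (PySem.List.enumerate rp.2 0).flatMap (fun cp =>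
      if (rp.1 - y).natAbs ≤ 1 ∧ (cp.1 - x).natAbs ≤ 1 ∧ [rp.1, cp.1] ≠ [y, x]
      then [cp.2] else []))

-- ===== PORT B =====
-- B: two clamped range loops over the 3x3 neighborhood, appending row[c] unless (r,c) = (y,x).
def get_adjacent_cell_alt (board : List (List Int)) (x : Int) (y : Int) : List Int :=
  (PySem.List.pyRange (max (y - 1) 0) (min (y + 2) (board.length : Int)) 1).foldl
    (fun acc r =>
      let row := PySem.List.pyGetD board r []
      (PySem.List.pyRange (max (x - 1) 0) (min (x + 2) (row.length : Int)) 1).foldl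
        (fun acc2 c =>
          if r ≠ y ∨ c ≠ x then acc2 ++ [PySem.List.pyGetD row c 0] else acc2)
        acc)
    []

-- ===== PRECONDITION & SPEC =====
def Spec_get_adjacent_cell (board : List (List Int)) (x : Int) (y : Int) (out : List Int) : Prop := out = get_adjacent_cell_alt board x y
instance (board : List (List Int)) (x : Int) (y : Int) (out : List Int) : Decidable (Spec_get_adjacent_cell board x y out) := by unfold Spec_get_adjacent_cell; infer_instance

-- ===== CLAIM (what is proved, stated in full; the proofs are below) =====
def Claim_equal_get_adjacent_cell : Prop := ∀ (board : List (List Int)) (x : Int) (y : Int), Dom_get_adjacent_cell board x y → Spec_get_adjacent_cell board x y (get_adjacent_cell board x y)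

-- ===== LEMMAS AND PROOFS =====

theorem pv_flatMap_congr {α β : Type} {l : List α} {f g : α → List β}
    (h : ∀ a ∈ l, f a = g a) : l.flatMap f = l.flatMap g := by
  induction l with
  | nil => rfl
  | cons a l ih =>
      simp only [List.flatMap_cons]
      rw [h a (List.mem_cons_self), ih (fun b hb => h b (List.mem_cons_of_mem _ hb))]

theorem pv_flatMap_nil {α β : Type} {l : List α} {f : α → List β}
    (h : ∀ a ∈ l, f a = []) : l.flatMap f = [] := by
  rw [pv_flatMap_congr h]; simp

-- core: a clamped neighborhood range loop with direct indexing equals the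
-- filtered full scan over the enumerated list
theorem pv_range_enum {α β : Type} (l : List α) (t : Int) (F : Int → α → List β) (d : α) :
    (PySem.List.pyRange (max (t - 1) 0) (min (t + 2) (l.length : Int)) 1).flatMap
      (fun i => F i (PySem.List.pyGetD l i d))
    = (PySem.List.enumerate l 0).flatMap
        (fun p => if (p.1 - t).natAbs ≤ 1 then F p.1 p.2 else []) := by
  rw [PySem.List.enumerate_eq_map_pyRange (d := d), List.flatMap_map]
  simp only [PySem.List.len_eq]
  by_cases hle : min (t + 2) (l.length : Int) ≤ max (t - 1) 0
  · rw [PySem.List.pyRange_one_eq_nil hle, List.flatMap_nil]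
    refine (pv_flatMap_nil ?_).symm
    intro i hi'
    rw [PySem.List.mem_pyRange_one] at hi'
    have hc : ¬ (i - t).natAbs ≤ 1 := by omega
    simp [hc]
  · push Not at hle
    have h0 : (0 : Int) ≤ max (t - 1) 0 := by omega
    have h1 : max (t - 1) 0 ≤ min (t + 2) (l.length : Int) := le_of_lt hle
    have h2 : min (t + 2) (l.length : Int) ≤ (l.length : Int) := by omega
    have hn : max (t - 1) 0 ≤ (l.length : Int) := le_trans h1 h2
    rw [PySem.List.pyRange_one_append 0 (max (t - 1) 0) (l.length : Int) h0 hn,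
        PySem.List.pyRange_one_append (max (t - 1) 0) (min (t + 2) (l.length : Int))
          (l.length : Int) h1 h2,
        List.flatMap_append, List.flatMap_append]
    have hleft : (PySem.List.pyRange 0 (max (t - 1) 0) 1).flatMap
        (fun i => if ((i, PySem.List.pyGetD l i d).1 - t).natAbs ≤ 1
                  then F (i, PySem.List.pyGetD l i d).1 (i, PySem.List.pyGetD l i d).2 else []) = [] := by
      refine pv_flatMap_nil ?_
      intro i hi'
      rw [PySem.List.mem_pyRange_one] at hi'
      have hc : ¬ (i - t).natAbs ≤ 1 := by omega
      simp [hc]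
    have hright : (PySem.List.pyRange (min (t + 2) (l.length : Int)) (l.length : Int) 1).flatMap
        (fun i => if ((i, PySem.List.pyGetD l i d).1 - t).natAbs ≤ 1
                  then F (i, PySem.List.pyGetD l i d).1 (i, PySem.List.pyGetD l i d).2 else []) = [] := by
      refine pv_flatMap_nil ?_
      intro i hi'
      rw [PySem.List.mem_pyRange_one] at hi'
      have hc : ¬ (i - t).natAbs ≤ 1 := by omega
      simp [hc]
    rw [hleft, hright, List.nil_append, List.append_nil]
    refine (pv_flatMap_congr ?_).symm
    intro i hi'
    rw [PySem.List.mem_pyRange_one] at hi'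
    have hc : (i - t).natAbs ≤ 1 := by omega
    simp [hc]

theorem pv_foldl_extend {α β : Type} {f : List β → α → List β} {g : α → List β}
    (h : ∀ acc x, f acc x = acc ++ g x) :
    ∀ (l : List α) (acc : List β), l.foldl f acc = acc ++ l.flatMap g := by
  intro l
  induction l with
  | nil => intro acc; simp
  | cons a l ih =>
      intro acc
      simp only [List.foldl_cons, List.flatMap_cons, h acc a, ih, List.append_assoc]

-- ===== VERDICT (by name: the statement is the Claim_ definition above) =====
theorem get_adjacent_cell_spec : Claim_equal_get_adjacent_cell := by
  intro board x y _
  unfold Spec_get_adjacent_cell get_adjacent_cell get_adjacent_cell_alt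
  have hinner : ∀ (r : Int) (row : List Int) (acc : List Int),
      (PySem.List.pyRange (max (x - 1) 0) (min (x + 2) (row.length : Int)) 1).foldl
        (fun acc2 c => if r ≠ y ∨ c ≠ x then acc2 ++ [PySem.List.pyGetD row c 0] else acc2) acc
      = acc ++ (PySem.List.pyRange (max (x - 1) 0) (min (x + 2) (row.length : Int)) 1).flatMap
          (fun c => if r ≠ y ∨ c ≠ x then [PySem.List.pyGetD row c 0] else []) := by
    intro r row acc
    exact pv_foldl_extend (by intro acc2 c; split <;> simp) _ acc
  have hB : (PySem.List.pyRange (max (y - 1) 0) (min (y + 2) (board.length : Int)) 1).foldl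
      (fun acc r =>
        let row := PySem.List.pyGetD board r []
        (PySem.List.pyRange (max (x - 1) 0) (min (x + 2) (row.length : Int)) 1).foldl
          (fun acc2 c => if r ≠ y ∨ c ≠ x then acc2 ++ [PySem.List.pyGetD row c 0] else acc2) acc)
      []
      = ([] : List Int) ++ (PySem.List.pyRange (max (y - 1) 0) (min (y + 2) (board.length : Int)) 1).flatMap
          (fun r => (PySem.List.pyRange (max (x - 1) 0)
              (min (x + 2) ((PySem.List.pyGetD board r []).length : Int)) 1).flatMap
            (fun c => if r ≠ y ∨ c ≠ x then [PySem.List.pyGetD (PySem.List.pyGetD board r []) c 0] else [])) := by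
    exact pv_foldl_extend (fun acc r => hinner r (PySem.List.pyGetD board r []) acc) _ []
  rw [hB, List.nil_append]
  rw [pv_range_enum board y
      (fun r row => (PySem.List.pyRange (max (x - 1) 0) (min (x + 2) (row.length : Int)) 1).flatMap
        (fun c => if r ≠ y ∨ c ≠ x then [PySem.List.pyGetD row c 0] else [])) []]
  refine (pv_flatMap_congr ?_)
  intro rp _
  have hrow := pv_range_enum rp.2 x (fun c v => if rp.1 ≠ y ∨ c ≠ x then [v] else []) 0
  by_cases hr : (rp.1 - y).natAbs ≤ 1
  · simp only [hr, if_true]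
    rw [hrow]
    refine pv_flatMap_congr ?_
    intro cp _
    by_cases hc : (cp.1 - x).natAbs ≤ 1
    · simp only [hc, true_and, if_true]
      by_cases hne : [rp.1, cp.1] ≠ [y, x]
      · have : rp.1 ≠ y ∨ cp.1 ≠ x := by
          by_contra hcon
          push Not at hcon
          exact hne (by simp [hcon.1, hcon.2])
        simp [hne, this]
      · push Not at hne
        have h1 : rp.1 = y ∧ cp.1 = x := by simpa using hne
        simp [h1.1, h1.2]
    · simp [hc]
  · simp only [hr, if_false]
    refine pv_flatMap_nil ?_
    intro cp _
    simp
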